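-- pv_equiv track=rewrite | github.com/CamiloYate09/Programacion2018-1-G2 | Semana11/funciones_ADN.py | generar_cadena_complementaria
-- ===== SOURCE A (Python) =====
-- def obtener_complemento(base):
--     """
--     (str) -> str
--
--     Obtiene un complemento dada una base
--     Precondicion: La base es valida
--
--     >>> obtener_complemento('A')
--     'T'
--     >>> obtener_complemento('T')
--     'A'
--     >>> obtener_complemento('Z')
--     Traceback (most recent call last):
--     ...
--     ValueError: Z no es una base valida
--
--     :param base: la base a evaluar
--     :return: la base complementaria
--     """
--     if base == 'A':
--         return 'T'
--     elif base == 'T':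
--         return 'A'
--     elif base == 'G':
--         return 'C'
--     elif base == 'C':
--         return 'G'
--     else:
--         raise ValueError(base + ' no es una base valida')
--
-- def generar_cadena_complementaria(ADN):
--     """
--     (str) -> str
--     Genera la cadena de ADN complementaria
--     Precondicion ADN es una cadena valida
--
--     >>> generar_cadena_complementaria('ATA')
--     'TAT'
--     >>> generar_cadena_complementaria('ATGC')
--     'TACG'
--     >>> generar_cadena_complementaria('ATGD')
--     Traceback (most recent call last):
--     ...
--     ValueError: ATGD no es una cadena de ADN valida
--
--     :param ADN: La cadena de ADN a validar
--     :return: La cadena complementaria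
--     """
--     complemento = ''
--     for base in ADN:
--         if es_base(base):
--             complemento += obtener_complemento(base)
--         else:
--             raise ValueError(ADN + ' no es una cadena de ADN valida')
--     return complemento
--
-- def es_base(base):
--     """
--     (str) -> bool
--
--     Decide si una cadena es una base
--
--     >>> es_base('A')
--     True
--     >>> es_base('T')
--     True
--     >>> es_base('Z')
--     False
--     >>> es_base('AT')
--     False
--
--     :param base: la cadena a evaluar
--     :return: True si es una base, False de lo contrario
--     """
--     return len(base) == 1 and base in 'ATCG'
-- ===== SOURCE B (Python) =====
-- def generar_cadena_complementaria(ADN):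
--     if not all(c in 'ATCG' for c in ADN):
--         raise ValueError(ADN + ' no es una cadena de ADN valida')
--     return ADN.translate(str.maketrans('ATGC', 'TACG'))
-- ===== Notes on version B (the rewrite author's own statement) =====
-- stated objective: idiomatic
-- what changed: B validates the whole string in one pass with all() and then builds the complement by a str.translate table transform, instead of A's per-character validate-and-append loop with a helper chain of ifs.
import Mathlib
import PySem

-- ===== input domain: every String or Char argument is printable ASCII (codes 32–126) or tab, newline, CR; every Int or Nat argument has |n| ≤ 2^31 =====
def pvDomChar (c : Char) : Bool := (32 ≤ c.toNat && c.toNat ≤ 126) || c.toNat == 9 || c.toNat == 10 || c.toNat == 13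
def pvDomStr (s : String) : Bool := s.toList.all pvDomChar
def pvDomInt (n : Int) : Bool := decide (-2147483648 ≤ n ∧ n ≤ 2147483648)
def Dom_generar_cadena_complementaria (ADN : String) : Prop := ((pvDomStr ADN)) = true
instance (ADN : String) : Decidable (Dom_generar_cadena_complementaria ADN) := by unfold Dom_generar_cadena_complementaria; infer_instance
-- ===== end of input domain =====

-- B validates the whole string in one pass, then builds the complement by a translation-table map,
-- instead of A's per-character validate-and-append loop (idiomatic decomposition; same cost).


-- ===== PORT A =====
-- es_base(base) for a single character: len == 1 always holds, membership in 'ATCG'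
def es_base (base : Char) : Bool := base = 'A' || base = 'T' || base = 'C' || base = 'G'

-- obtener_complemento: the if/elif chain; the final 'raise' branch is unreachable inside Pre_
-- (the caller checks es_base first); it returns "" here.
def obtener_complemento (base : Char) : String :=
  if base = 'A' then "T"
  else if base = 'T' then "A"
  else if base = 'G' then "C"
  else if base = 'C' then "G"
  else ""  -- raise ValueError (outside Pre_)

-- the for-loop: accumulate complemento; on an invalid base A raises (outside Pre_; returns acc here)
def genA_loop : List Char → String → String
  | [], acc => acc
  | c :: cs, acc =>
      if es_base c then genA_loop cs (acc ++ obtener_complemento c)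
      else acc  -- raise ValueError (outside Pre_)

def generar_cadena_complementaria (ADN : String) : String :=
  genA_loop ADN.toList ""

-- ===== PORT B =====
-- the translate table maketrans('ATGC','TACG') as a per-character function
def trB (c : Char) : Char :=
  if c = 'A' then 'T' else if c = 'T' then 'A' else if c = 'G' then 'C'
  else if c = 'C' then 'G' else c

def generar_cadena_complementaria_alt (ADN : String) : String :=
  if !(ADN.toList.all fun c => c = 'A' || c = 'T' || c = 'C' || c = 'G')
  then ""  -- raise ValueError (outside Pre_)
  else String.ofList (ADN.toList.map trB)

-- ===== PRECONDITION & SPEC =====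
-- Pre_ excludes exactly the inputs with a character outside 'ATCG', on which A raises ValueError.
def Pre_generar_cadena_complementaria (ADN : String) : Prop :=
  (ADN.toList.all fun c => c = 'A' || c = 'T' || c = 'C' || c = 'G') = true
instance (ADN : String) : Decidable (Pre_generar_cadena_complementaria ADN) := by
  unfold Pre_generar_cadena_complementaria; infer_instance

def pvWitness_generar_cadena_complementaria : String := "ATGC"

def Spec_generar_cadena_complementaria (ADN : String) (out : String) : Prop :=
  out = generar_cadena_complementaria_alt ADN
instance (ADN : String) (out : String) : Decidable (Spec_generar_cadena_complementaria ADN out) := by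
  unfold Spec_generar_cadena_complementaria; infer_instance

-- ===== CLAIM =====
def Claim_equal_generar_cadena_complementaria : Prop := ∀ (ADN : String), Dom_generar_cadena_complementaria ADN → Pre_generar_cadena_complementaria ADN → Spec_generar_cadena_complementaria ADN (generar_cadena_complementaria ADN)

-- ===== LEMMAS AND PROOFS =====
theorem genA_loop_eq (l : List Char) (acc : String)
    (h : ∀ c ∈ l, (c = 'A' || c = 'T' || c = 'C' || c = 'G') = true) :
    genA_loop l acc = acc ++ String.ofList (l.map trB) := by
  induction l generalizing acc with
  | nil => simp [genA_loop]
  | cons c cs ih =>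
    have hc := h c (by simp)
    have hcs : ∀ x ∈ cs, (x = 'A' || x = 'T' || x = 'C' || x = 'G') = true :=
      fun x hx => h x (by simp [hx])
    have hbase : es_base c = true := by
      simp only [es_base]; exact hc
    have hcomp : obtener_complemento c = String.ofList [trB c] := by
      simp only [Bool.or_eq_true, decide_eq_true_eq] at hc
      rcases hc with ((h1 | h1) | h1) | h1 <;> subst h1 <;> decide
    simp only [genA_loop, hbase, if_pos, List.map_cons]
    rw [ih _ hcs, hcomp, String.append_assoc, ← String.ofList_append]; rfl

-- ===== VERDICT =====
theorem generar_cadena_complementaria_spec : Claim_equal_generar_cadena_complementaria := by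
  intro ADN _ hpre
  unfold Spec_generar_cadena_complementaria generar_cadena_complementaria
    generar_cadena_complementaria_alt
  unfold Pre_generar_cadena_complementaria at hpre
  rw [hpre]
  simp only [Bool.not_true, Bool.false_eq_true, if_false]
  rw [List.all_eq_true] at hpre
  rw [genA_loop_eq _ _ hpre]
  simp
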